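-- pv_equiv track=rewrite | github.com/ptjung/aoc-2021 | entries/day03/main_sh.py | bit_sum
-- ===== SOURCE A (Python) =====
-- def bit_sum(bits, i):
--     s = 0
--     for b in bits:
--         if b[i] == '0':
--             s -= 1
--         elif b[i] == '1':
--             s += 1
--     return s
-- ===== SOURCE B (Python) =====
-- def bit_sum(bits, i):
--     col = [b[i] for b in bits]
--     return col.count('1') - col.count('0')
-- ===== Notes on version B (the rewrite author's own statement) =====
-- stated objective: idiomatic
-- what changed: Replaces the per-element +1/-1 accumulator with branching by extracting the i-th column once and returning col.count('1') - col.count('0').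
import Mathlib
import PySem

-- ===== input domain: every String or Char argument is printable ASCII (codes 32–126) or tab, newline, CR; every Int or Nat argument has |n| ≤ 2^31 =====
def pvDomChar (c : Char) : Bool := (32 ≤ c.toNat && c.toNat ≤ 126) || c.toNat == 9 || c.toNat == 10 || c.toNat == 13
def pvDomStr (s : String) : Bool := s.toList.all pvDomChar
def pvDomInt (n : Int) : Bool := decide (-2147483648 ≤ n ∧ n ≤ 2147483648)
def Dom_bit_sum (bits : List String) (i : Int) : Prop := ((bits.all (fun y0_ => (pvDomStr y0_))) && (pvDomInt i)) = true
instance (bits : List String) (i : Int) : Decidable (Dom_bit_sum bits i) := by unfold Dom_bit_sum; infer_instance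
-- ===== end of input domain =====

-- B extracts the i-th column once and returns count '1' minus count '0'; A keeps a ±1 accumulator.

-- ===== PORT A =====
-- literal port of A: fold over bits with accumulator s, branching on b[i]
def bit_sum (bits : List String) (i : Int) : Int :=
  bits.foldl (fun s b =>
    if PySem.Str.pyGet? b i = some '0' then s - 1
    else if PySem.Str.pyGet? b i = some '1' then s + 1
    else s) 0

-- ===== PORT B =====
-- literal port of B: col = [b[i] for b in bits]; col.count('1') - col.count('0')
def bit_sum_alt (bits : List String) (i : Int) : Int :=
  let col : List (Option Char) := bits.map (fun b => PySem.Str.pyGet? b i)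
  (PySem.List.count col (some '1') : Int) - (PySem.List.count col (some '0') : Int)

-- ===== PRECONDITION & SPEC =====
-- Pre_ excludes exactly the inputs where b[i] raises IndexError for some b in bits.
def Pre_bit_sum (bits : List String) (i : Int) : Prop :=
  ∀ b ∈ bits, PySem.Raise.InRange b.toList.length i
instance (bits : List String) (i : Int) : Decidable (Pre_bit_sum bits i) := by
  unfold Pre_bit_sum; infer_instance
def pvWitness_bit_sum : List String × Int := (["01", "10", "11"], 1)
def Spec_bit_sum (bits : List String) (i : Int) (out : Int) : Prop := out = bit_sum_alt bits i
instance (bits : List String) (i : Int) (out : Int) : Decidable (Spec_bit_sum bits i out) := by unfold Spec_bit_sum; infer_instance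

-- ===== CLAIM (what is proved, stated in full; the proofs are below) =====
def Claim_equal_bit_sum : Prop := ∀ (bits : List String) (i : Int), Dom_bit_sum bits i → Pre_bit_sum bits i → Spec_bit_sum bits i (bit_sum bits i)

-- ===== LEMMAS AND PROOFS =====

-- A's fold on (b :: bits) vs the column counts, accumulator generalized
lemma bit_sum_foldl_eq (bits : List String) (i : Int) (s : Int) :
    bits.foldl (fun s b =>
      if PySem.Str.pyGet? b i = some '0' then s - 1
      else if PySem.Str.pyGet? b i = some '1' then s + 1
      else s) s
    = s + ((PySem.List.count (bits.map (fun b => PySem.Str.pyGet? b i)) (some '1') : Int)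
         - (PySem.List.count (bits.map (fun b => PySem.Str.pyGet? b i)) (some '0') : Int)) := by
  induction bits generalizing s with
  | nil => simp [PySem.List.count]
  | cons b bs ih =>
    simp only [List.foldl_cons, List.map_cons, ih]
    by_cases h0 : PySem.List.pyGet? b.toList i = some '0'
    · simp [PySem.List.count, PySem.Str.pyGet?, h0, List.count_cons]
      ring
    · by_cases h1 : PySem.List.pyGet? b.toList i = some '1'
      · simp [PySem.List.count, PySem.Str.pyGet?, h0, h1, List.count_cons]
        ring
      · simp [PySem.List.count, PySem.Str.pyGet?, h0, h1, List.count_cons]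

-- ===== VERDICT (by name: the statement is the Claim_ definition above) =====
theorem bit_sum_spec : Claim_equal_bit_sum := by
  intro bits i _ _
  unfold Spec_bit_sum bit_sum bit_sum_alt
  simpa using bit_sum_foldl_eq bits i 0
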